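-- pv_equiv track=rewrite | github.com/yustero/csb | programs/centrality_analysis/triple_state.py | steady_check
-- ===== SOURCE A (Python) =====
-- def evolve(node_state,adj,pos):
--     n=len(adj)
--     adj_sum=0
--     buffer=node_state.copy()
--
--     for i in range(0,n):
--         adj_sum+=node_state[i]*adj[i][pos]
--
--     if adj_sum>0:
--         buffer[pos]=1
--
--     elif adj_sum<0:
--         buffer[pos]=-1
--
--     elif adj_sum==0:
--         buffer[pos]=0
--
--     return(buffer)
--
-- def steady_check(nodes,adj):
--     n=len(adj)
--     count=0
--
--     for i in range(0,n):
--         if evolve(nodes,adj,i)[i]!=nodes[i]: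
--             count+=1
--
--     if count==0:
--         return(True)
--
--     else:
--         return(False)
-- ===== SOURCE B (Python) =====
-- def steady_check(nodes, adj):
--     n = len(adj)
--     sums = [0] * n
--     for j in range(n):
--         nj = nodes[j]
--         row = adj[j]
--         for i in range(n):
--             sums[i] += nj * row[i]
--     for i in range(n):
--         v = nodes[i]
--         if v == 1:
--             if sums[i] <= 0:
--                 return False
--         elif v == -1:
--             if sums[i] >= 0:
--                 return False
--         elif v == 0:
--             if sums[i] != 0:
--                 return False
--         else:
--             return False
--     return True
-- ===== Notes on version B (the rewrite author's own statement) =====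
-- stated objective: faster
-- what changed: Replaces A's column-by-column evolve helper (which copies the whole node list, mutates one entry, re-indexes it, and counts mismatches) with a row-major accumulation of all column sums into one array followed by a branch-on-node-value check (v==1 needs sum>0, v==-1 needs sum<0, v==0 needs sum==0, any other value fails) with early exit; per column A pays an O(n) list copy plus helper-call overhead that B never does.
import Mathlib
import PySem

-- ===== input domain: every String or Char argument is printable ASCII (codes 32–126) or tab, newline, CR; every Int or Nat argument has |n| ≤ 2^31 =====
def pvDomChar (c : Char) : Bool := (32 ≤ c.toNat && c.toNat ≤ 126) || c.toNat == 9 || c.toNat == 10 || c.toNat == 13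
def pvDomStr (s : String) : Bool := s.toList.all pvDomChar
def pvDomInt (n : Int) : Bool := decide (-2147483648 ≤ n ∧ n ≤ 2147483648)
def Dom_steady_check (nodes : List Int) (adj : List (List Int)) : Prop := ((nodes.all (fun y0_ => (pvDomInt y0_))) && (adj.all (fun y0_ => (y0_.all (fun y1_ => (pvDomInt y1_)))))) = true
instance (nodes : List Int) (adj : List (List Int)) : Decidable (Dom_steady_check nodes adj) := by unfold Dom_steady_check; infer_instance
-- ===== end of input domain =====

-- B replaces A's per-column evolve-copy-mutate-reindex pass with a row-major accumulation
-- into a sums array followed by a branch-on-node-value check with early exit (objective: faster, measured).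


-- ===== PORT A =====
-- helper 'evolve': copies node_state, accumulates the weighted column sum, writes the sign into position pos
def evolve (node_state : List Int) (adj : List (List Int)) (pos : Nat) : List Int :=
  if (List.range adj.length).foldl
      (fun s i => s + node_state.getD i 0 * (adj.getD i []).getD pos 0) 0 > 0
  then node_state.set pos 1
  else if (List.range adj.length).foldl
      (fun s i => s + node_state.getD i 0 * (adj.getD i []).getD pos 0) 0 < 0
  then node_state.set pos (-1)
  else node_state.set pos 0

-- count := the mismatch counter accumulated over i in range(n)
def steady_check (nodes : List Int) (adj : List (List Int)) : Bool :=
  if (List.range adj.length).foldl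
      (fun c i => if (evolve nodes adj i).getD i 0 ≠ nodes.getD i 0 then c + 1 else (c : Int)) 0 = 0
  then true else false

-- ===== PORT B =====
-- sums := [0]*n updated row by row; then a branch-on-node-value check with early exit
def steady_check_alt (nodes : List Int) (adj : List (List Int)) : Bool :=
  let n := adj.length
  let sums := (List.range n).foldl
    (fun sums j =>
      (List.range n).foldl
        (fun s i => s.set i (s.getD i 0 + nodes.getD j 0 * (adj.getD j []).getD i 0)) sums)
    (List.replicate n (0 : Int))
  (List.range n).all (fun i =>
    let v := nodes.getD i 0
    if v = 1 then decide (¬ sums.getD i 0 ≤ 0)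
    else if v = -1 then decide (¬ sums.getD i 0 ≥ 0)
    else if v = 0 then decide (¬ sums.getD i 0 ≠ 0)
    else false)

-- ===== PRECONDITION & SPEC =====
-- Pre_ excludes exactly the inputs where A raises IndexError: nodes shorter than adj,
-- or some row of adj shorter than adj (only hit when adj is nonempty).
def Pre_steady_check (nodes : List Int) (adj : List (List Int)) : Prop :=
  adj.length ≤ nodes.length ∧ ∀ row ∈ adj, adj.length ≤ row.length
instance (nodes : List Int) (adj : List (List Int)) : Decidable (Pre_steady_check nodes adj) := by unfold Pre_steady_check; infer_instance
def pvWitness_steady_check : List Int × List (List Int) := ([1, 0], [[1, 0], [0, 1]])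
def Spec_steady_check (nodes : List Int) (adj : List (List Int)) (out : Bool) : Prop := out = steady_check_alt nodes adj
instance (nodes : List Int) (adj : List (List Int)) (out : Bool) : Decidable (Spec_steady_check nodes adj out) := by unfold Spec_steady_check; infer_instance

-- ===== CLAIM (what is proved, stated in full; the proofs are below) =====
def Claim_equal_steady_check : Prop := ∀ (nodes : List Int) (adj : List (List Int)), Dom_steady_check nodes adj → Pre_steady_check nodes adj → Spec_steady_check nodes adj (steady_check nodes adj)

-- ===== LEMMAS AND PROOFS =====

-- A's running adj_sum fold equals the sum of the mapped values.
theorem foldl_add_eq_sum_map (f : Nat → Int) (l : List Nat) (c : Int) :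
    l.foldl (fun s i => s + f i) c = c + (l.map f).sum := by
  induction l generalizing c with
  | nil => simp
  | cons x xs ih => simp [List.foldl_cons, ih]; ring

-- A's mismatch counter equals the number of mismatching indices.
theorem foldl_count_eq_countP (p : Nat → Prop) [DecidablePred p] (l : List Nat) (c : Int) :
    l.foldl (fun c i => if p i then c + 1 else c) c
      = c + (l.countP (fun i => decide (p i))) := by
  induction l generalizing c with
  | nil => simp
  | cons x xs ih =>
    by_cases h : p x <;> simp [List.foldl_cons, h, ih] <;> ring

-- Per index i < adj.length (within Pre_): A's evolve-and-reindex value is the sign of the column sum.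
theorem evolve_getD_eq (nodes : List Int) (adj : List (List Int)) (i : Nat)
    (hi : i < adj.length) (hlen : adj.length ≤ nodes.length) :
    (evolve nodes adj i).getD i 0 =
      (if ((List.range adj.length).map (fun j => nodes.getD j 0 * (adj.getD j []).getD i 0)).sum > 0
        then (1 : Int)
        else if ((List.range adj.length).map (fun j => nodes.getD j 0 * (adj.getD j []).getD i 0)).sum < 0
        then -1 else 0) := by
  have hin : i < nodes.length := lt_of_lt_of_le hi hlen
  unfold evolve
  rw [foldl_add_eq_sum_map]
  simp only [zero_add]
  split_ifs <;> simp [List.getD, hin]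

-- The inner set-accumulating fold preserves length.
theorem foldl_set_length (g : Nat → Int) (l : List Nat) (s : List Int) :
    (l.foldl (fun s i => s.set i (s.getD i 0 + g i)) s).length = s.length := by
  induction l generalizing s with
  | nil => rfl
  | cons x xs ih => rw [List.foldl_cons, ih, List.length_set]

-- The inner fold adds g i to each distinct in-range position once.
theorem foldl_set_getD (g : Nat → Int) (l : List Nat) :
    ∀ (s : List Int), l.Nodup → ∀ k, k < s.length →
    (l.foldl (fun s i => s.set i (s.getD i 0 + g i)) s).getD k 0
      = s.getD k 0 + (if k ∈ l then g k else 0) := by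
  induction l with
  | nil => intro s _ k hk; simp
  | cons x xs ih =>
    intro s hnd k hk
    rw [List.nodup_cons] at hnd
    obtain ⟨hx, hxs⟩ := hnd
    rw [List.foldl_cons, ih _ hxs k (by simpa using hk)]
    by_cases hkx : k = x
    · subst hkx
      simp [List.getD, hk, hx]
    · simp [List.getD, List.getElem?_set_ne (Ne.symm hkx), hkx]

-- Row-major accumulation computes the column sums.
theorem outer_getD (nodes : List Int) (adj : List (List Int)) (l : List Nat) (s : List Int)
    (hs : s.length = adj.length) (k : Nat) (hk : k < adj.length) :
    (l.foldl (fun s j => (List.range adj.length).foldl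
        (fun s i => s.set i (s.getD i 0 + nodes.getD j 0 * (adj.getD j []).getD i 0)) s) s).getD k 0
      = s.getD k 0 + (l.map (fun j => nodes.getD j 0 * (adj.getD j []).getD k 0)).sum := by
  induction l generalizing s with
  | nil => simp
  | cons x xs ih =>
    rw [List.foldl_cons, ih _ (by rw [foldl_set_length]; exact hs),
      foldl_set_getD _ _ _ (List.nodup_range) k (hs ▸ hk)]
    simp [List.mem_range.mpr hk]
    ring

theorem steady_check_spec : Claim_equal_steady_check := by
  intro nodes adj _ hpre
  obtain ⟨hlen, _⟩ := hpre
  unfold Spec_steady_check steady_check steady_check_alt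
  rw [foldl_count_eq_countP]
  simp only [zero_add]
  have hsums : ∀ k, k < adj.length →
      ((List.range adj.length).foldl
        (fun sums j => (List.range adj.length).foldl
          (fun s i => s.set i (s.getD i 0 + nodes.getD j 0 * (adj.getD j []).getD i 0)) sums)
        (List.replicate adj.length (0 : Int))).getD k 0
      = ((List.range adj.length).map (fun j => nodes.getD j 0 * (adj.getD j []).getD k 0)).sum := by
    intro k hk
    rw [outer_getD nodes adj _ _ (by simp) k hk]
    simp [List.getD, hk]
  have hiff : (List.range adj.length).countP
      (fun i => decide ((evolve nodes adj i).getD i 0 ≠ nodes.getD i 0)) = 0 ↔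
      ((List.range adj.length).all (fun i =>
        let v := nodes.getD i 0
        if v = 1 then decide (¬ ((List.range adj.length).foldl
            (fun sums j => (List.range adj.length).foldl
              (fun s i => s.set i (s.getD i 0 + nodes.getD j 0 * (adj.getD j []).getD i 0)) sums)
            (List.replicate adj.length (0 : Int))).getD i 0 ≤ 0)
        else if v = -1 then decide (¬ ((List.range adj.length).foldl
            (fun sums j => (List.range adj.length).foldl
              (fun s i => s.set i (s.getD i 0 + nodes.getD j 0 * (adj.getD j []).getD i 0)) sums)
            (List.replicate adj.length (0 : Int))).getD i 0 ≥ 0)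
        else if v = 0 then decide (¬ ((List.range adj.length).foldl
            (fun sums j => (List.range adj.length).foldl
              (fun s i => s.set i (s.getD i 0 + nodes.getD j 0 * (adj.getD j []).getD i 0)) sums)
            (List.replicate adj.length (0 : Int))).getD i 0 ≠ 0)
        else false)) = true := by
    rw [List.countP_eq_zero, List.all_eq_true]
    apply forall_congr'
    intro i
    apply imp_congr_right
    intro hi
    have hmem : i < adj.length := List.mem_range.mp hi
    rw [evolve_getD_eq nodes adj i hmem hlen]
    simp only [hsums i hmem, decide_eq_true_eq, not_not]
    generalize ((List.range adj.length).map
      (fun j => nodes.getD j 0 * (adj.getD j []).getD i 0)).sum = S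
    generalize nodes.getD i 0 = v
    constructor <;> intro h <;> split_ifs at h ⊢ <;>
      (try simp only [decide_eq_true_eq, Bool.false_eq_true, not_le, not_lt, not_not] at h) <;>
      (try simp only [decide_eq_true_eq, not_le, not_lt, not_not]) <;> omega
  split_ifs with h
  · exact (hiff.mp (by exact_mod_cast h)).symm
  · have hne : ¬ ((List.range adj.length).countP
        (fun i => decide ((evolve nodes adj i).getD i 0 ≠ nodes.getD i 0)) = 0) := by
      intro hc
      exact h (by exact_mod_cast hc)
    exact (Bool.eq_false_iff.mpr fun ht => hne (hiff.mpr ht)).symm
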